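-- pv_equiv track=rewrite | github.com/jacob-fenster/NGS_gRNA | test_data/pMSA_algorithm/scripts/pMSA.py | pMSA_dict
-- ===== SOURCE A (Python) =====
-- def pMSA_dict(dict1, dict2):
-- #builds a pMSA dict from two dictionaries of single MSAs {code:[lab,seq]}. Paires based on common keys
-- #concatinates lab for new lab, and seqs for new seq
--     pMSA, unique1, unique2 = {}, {}, {}
--     for code in dict1:
--         if code in dict2:
--             pMSA[code] = [dict1[code][0]+'__'+dict2[code][0], dict1[code][1]+dict2[code][1]]
--         else:
--             unique1[code] = [dict1[code][0], dict1[code][1]]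
--     for code in dict2:
--         if code not in dict1:
--             unique2[code] = [dict2[code][0], dict2[code][1]]
--     return pMSA, unique1, unique2
-- ===== SOURCE B (Python) =====
-- def pMSA_dict(dict1, dict2):
--     # Single pass over dict1 that CONSUMES a working copy of dict2: a popped key is a
--     # common key (pair it), a failed pop is unique to dict1; whatever survives the
--     # pass is exactly unique2 -- no second loop over dict2 and no membership branch
--     # re-testing the other dict.
--     rest2 = {k: [v[0], v[1]] for k, v in dict2.items()}
--     pMSA, unique1 = {}, {}
--     for k, v in dict1.items():
--         w = rest2.pop(k, None)
--         if w is None: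
--             unique1[k] = [v[0], v[1]]
--         else:
--             pMSA[k] = [v[0] + '__' + w[0], v[1] + w[1]]
--     return pMSA, unique1, rest2
-- ===== Notes on version B (the rewrite author's own statement) =====
-- stated objective: alternative
-- what changed: A makes two loops each re-testing membership in the other dict; B makes one pass over dict1 that pops matched keys out of a working copy of dict2 (pop miss = unique1, hit = paired), and the copy's leftovers are returned as unique2 with no second loop or membership branch.
import Mathlib
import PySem

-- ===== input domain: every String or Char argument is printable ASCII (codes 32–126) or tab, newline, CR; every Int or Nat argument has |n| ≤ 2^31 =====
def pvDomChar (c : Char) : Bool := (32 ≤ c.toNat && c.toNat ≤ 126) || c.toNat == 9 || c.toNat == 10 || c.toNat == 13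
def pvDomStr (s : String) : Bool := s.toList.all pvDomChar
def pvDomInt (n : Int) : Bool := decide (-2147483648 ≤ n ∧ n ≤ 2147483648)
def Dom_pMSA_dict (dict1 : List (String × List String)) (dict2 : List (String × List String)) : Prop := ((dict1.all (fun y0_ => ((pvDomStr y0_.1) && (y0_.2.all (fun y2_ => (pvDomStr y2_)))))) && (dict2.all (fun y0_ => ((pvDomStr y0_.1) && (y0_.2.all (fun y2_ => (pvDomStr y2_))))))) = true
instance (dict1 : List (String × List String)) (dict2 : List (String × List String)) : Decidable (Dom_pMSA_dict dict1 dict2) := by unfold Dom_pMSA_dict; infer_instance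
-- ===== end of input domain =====

-- B replaces A's two loops (each re-testing membership in the other dict) by one pass over
-- dict1 that consumes a working copy of dict2 via pop: leftovers are unique2 (objective: alternative).

-- ===== PORT A =====
-- Two loops: the first, over dict1, fills pMSA/unique1 by a membership test in dict2; the
-- second, over dict2, fills unique2 by a membership test in dict1.  Literal transliteration:
-- iterating a dict's items, dictX[code] is the iterated pair's value; cross-dict lookups via
-- Dict.getD and value indexing via List.getD, exact under Pre_ (value lists have ≥ 2 elements).
def pvStepA (d2 : PySem.Dict String (List String))
    (acc : List (String × List String) × List (String × List String))
    (p : String × List String) : List (String × List String) × List (String × List String) :=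
  if d2.contains p.1 then
    (acc.1 ++ [(p.1, [p.2.getD 0 "" ++ "__" ++ (d2.getD p.1 []).getD 0 "",
                      p.2.getD 1 "" ++ (d2.getD p.1 []).getD 1 ""])], acc.2)
  else
    (acc.1, acc.2 ++ [(p.1, [p.2.getD 0 "", p.2.getD 1 ""])])

def pvStepU (d1 : PySem.Dict String (List String))
    (acc : List (String × List String)) (p : String × List String) : List (String × List String) :=
  if d1.contains p.1 then acc else acc ++ [(p.1, [p.2.getD 0 "", p.2.getD 1 ""])]

def pMSA_dict (dict1 : List (String × List String)) (dict2 : List (String × List String)) : (List (String × List String)) × (List (String × List String)) × (List (String × List String)) :=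
  let st := dict1.foldl (pvStepA (PySem.Dict.mk dict2)) ([], [])
  let u2 := dict2.foldl (pvStepU (PySem.Dict.mk dict1)) []
  (st.1, st.2, u2)

-- ===== PORT B =====
-- One pass over dict1 consuming a fresh working copy of dict2 (pop with a miss sentinel);
-- whatever survives the pass IS unique2.
def pvStepB (acc : PySem.Dict String (List String) × List (String × List String) × List (String × List String))
    (p : String × List String) : PySem.Dict String (List String) × List (String × List String) × List (String × List String) :=
  match acc.1.pop? p.1 with
  | none => (acc.1, acc.2.1, acc.2.2 ++ [(p.1, [p.2.getD 0 "", p.2.getD 1 ""])])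
  | some (w, r) => (r, acc.2.1 ++ [(p.1, [p.2.getD 0 "" ++ "__" ++ w.getD 0 "",
                                          p.2.getD 1 "" ++ w.getD 1 ""])], acc.2.2)

def pMSA_dict_alt (dict1 : List (String × List String)) (dict2 : List (String × List String)) : (List (String × List String)) × (List (String × List String)) × (List (String × List String)) :=
  let rest2 := PySem.Dict.mk (dict2.map (fun p => (p.1, [p.2.getD 0 "", p.2.getD 1 ""])))
  let st := dict1.foldl pvStepB (rest2, [], [])
  (st.2.1, st.2.2, st.1.items)

-- ===== PRECONDITION & SPEC =====
-- Pre_ excludes (a) association lists with duplicate keys — a Python dict cannot contain them,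
-- so such lists are an ambiguous representation of A's dict arguments — and (b) entries whose
-- value list has fewer than two elements, on which A raises IndexError.
def Pre_pMSA_dict (dict1 : List (String × List String)) (dict2 : List (String × List String)) : Prop :=
  (dict1.map Prod.fst).Nodup ∧ (dict2.map Prod.fst).Nodup ∧
  (∀ p ∈ dict1, 2 ≤ p.2.length) ∧ (∀ p ∈ dict2, 2 ≤ p.2.length)
instance (dict1 : List (String × List String)) (dict2 : List (String × List String)) : Decidable (Pre_pMSA_dict dict1 dict2) := by unfold Pre_pMSA_dict; infer_instance
def pvWitness_pMSA_dict : (List (String × List String)) × (List (String × List String)) :=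
  ([("a", ["A", "GG"])], [("a", ["B", "CC"]), ("b", ["D", "TT"])])

def Spec_pMSA_dict (dict1 : List (String × List String)) (dict2 : List (String × List String)) (out : (List (String × List String)) × (List (String × List String)) × (List (String × List String))) : Prop := out = pMSA_dict_alt dict1 dict2
instance (dict1 : List (String × List String)) (dict2 : List (String × List String)) (out : (List (String × List String)) × (List (String × List String)) × (List (String × List String))) : Decidable (Spec_pMSA_dict dict1 dict2 out) := by unfold Spec_pMSA_dict; infer_instance

-- ===== CLAIM (what is proved, stated in full; the proofs are below) =====
def Claim_equal_pMSA_dict : Prop := ∀ (dict1 : List (String × List String)) (dict2 : List (String × List String)), Dom_pMSA_dict dict1 dict2 → Pre_pMSA_dict dict1 dict2 → Spec_pMSA_dict dict1 dict2 (pMSA_dict dict1 dict2)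

-- ===== LEMMAS AND PROOFS =====

-- value projection [v[0], v[1]] and the two entry builders used by the closed-form spec
def pvG (v : List String) : List String := [v.getD 0 "", v.getD 1 ""]
def pvMg (p : String × List String) : String × List String := (p.1, pvG p.2)
def pvFP (d2 : PySem.Dict String (List String)) (p : String × List String) : String × List String :=
  (p.1, [p.2.getD 0 "" ++ "__" ++ (d2.getD p.1 []).getD 0 "", p.2.getD 1 "" ++ (d2.getD p.1 []).getD 1 ""])

theorem pv_contains_mk (L : List (String × List String)) (k : String) :
    (PySem.Dict.mk L).contains k = decide (k ∈ L.map Prod.fst) := by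
  simp only [PySem.Dict.contains]
  rw [Bool.eq_iff_iff]
  simp only [List.any_eq_true, List.mem_map, beq_iff_eq, decide_eq_true_eq]

theorem pv_find?_filter (L : List (String × List String)) (P : List String) (k : String) (hk : k ∉ P) :
    (L.filter (fun q => !decide (q.1 ∈ P))).find? (fun q => q.1 == k)
      = L.find? (fun q => q.1 == k) := by
  induction L with
  | nil => simp
  | cons a L ih =>
    by_cases h : a.1 ∈ P
    · have hak : (a.1 == k) = false := by
        simp only [beq_eq_false_iff_ne]; rintro rfl; exact hk h
      simp [List.filter_cons, h, List.find?_cons, hak, ih]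
    · cases hak : (a.1 == k) with
      | true => simp [List.filter_cons, h, List.find?_cons, hak]
      | false => simp [List.filter_cons, h, List.find?_cons, hak, ih]

-- A's first loop, in closed form
theorem pv_afold (d2 : PySem.Dict String (List String)) (l1 : List (String × List String))
    (a b : List (String × List String)) :
    l1.foldl (pvStepA d2) (a, b)
      = (a ++ (l1.filter (fun p => d2.contains p.1)).map (pvFP d2),
         b ++ (l1.filter (fun p => !d2.contains p.1)).map pvMg) := by
  induction l1 generalizing a b with
  | nil => simp
  | cons p l1 ih =>
    cases hc : d2.contains p.1 with
    | true => simp [List.foldl_cons, pvStepA, hc, ih, pvFP]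
    | false => simp [List.foldl_cons, pvStepA, hc, ih, pvMg, pvG]

-- A's second loop, in closed form
theorem pv_ufold (d1 : PySem.Dict String (List String)) (l : List (String × List String))
    (a : List (String × List String)) :
    l.foldl (pvStepU d1) a = a ++ (l.filter (fun p => !d1.contains p.1)).map pvMg := by
  induction l generalizing a with
  | nil => simp
  | cons p l ih =>
    cases hc : d1.contains p.1 with
    | true => simp [List.foldl_cons, pvStepU, hc, ih]
    | false => simp [List.foldl_cons, pvStepU, hc, ih, pvMg, pvG]

-- B's consuming loop: invariant over the already-processed key set P
theorem pv_bfold (dict2 : List (String × List String)) (l1 : List (String × List String))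
    (P : List String) (pm u1 : List (String × List String))
    (hnd : (l1.map Prod.fst).Nodup) (hP : ∀ k ∈ l1.map Prod.fst, k ∉ P) :
    l1.foldl pvStepB
        (PySem.Dict.mk ((dict2.map pvMg).filter (fun q => !decide (q.1 ∈ P))), pm, u1)
      = (PySem.Dict.mk ((dict2.map pvMg).filter
            (fun q => !decide (q.1 ∈ P ++ l1.map Prod.fst))),
         pm ++ (l1.filter (fun p => (PySem.Dict.mk dict2).contains p.1)).map
            (pvFP (PySem.Dict.mk dict2)),
         u1 ++ (l1.filter (fun p => !(PySem.Dict.mk dict2).contains p.1)).map pvMg) := by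
  induction l1 generalizing P pm u1 with
  | nil => simp
  | cons p l1 ih =>
    have hp : p.1 ∉ P := hP p.1 (by simp)
    have hnd' : (p.1 :: l1.map Prod.fst).Nodup := by simpa using hnd
    obtain ⟨hhd, hnd2⟩ := List.nodup_cons.mp hnd'
    have hP' : ∀ k ∈ l1.map Prod.fst, k ∉ P ++ [p.1] := by
      intro k hk
      have hne : k ≠ p.1 := by rintro rfl; exact hhd hk
      have hkP := hP k (by simp [hk])
      simp [List.mem_append, hne, hkP]
    have hfind : ((dict2.map pvMg).filter (fun q => !decide (q.1 ∈ P))).find?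
        (fun q => q.1 == p.1) = (dict2.find? (fun q => q.1 == p.1)).map pvMg := by
      rw [pv_find?_filter _ _ _ hp, List.find?_map]
      rfl
    have hget2 : (PySem.Dict.mk dict2).get? p.1
        = Option.map Prod.snd (dict2.find? (fun q => q.1 == p.1)) := rfl
    cases hf : dict2.find? (fun q => q.1 == p.1) with
    | none =>
      have hc : (PySem.Dict.mk dict2).contains p.1 = false := by
        rw [PySem.Dict.contains_eq_isSome_get?, hget2, hf]; rfl
      have hnomem : ∀ q ∈ dict2.map pvMg, q.1 ≠ p.1 := by
        intro q hq
        obtain ⟨q', hq', rfl⟩ := List.mem_map.mp hq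
        have := List.find?_eq_none.mp hf q' hq'
        simpa [pvMg] using this
      have hstep : pvStepB (PySem.Dict.mk ((dict2.map pvMg).filter
            (fun q => !decide (q.1 ∈ P))), pm, u1) p
          = (PySem.Dict.mk ((dict2.map pvMg).filter (fun q => !decide (q.1 ∈ P ++ [p.1]))),
             pm, u1 ++ [pvMg p]) := by
        have hfilt : (dict2.map pvMg).filter (fun q => !decide (q.1 ∈ P))
            = (dict2.map pvMg).filter (fun q => !decide (q.1 ∈ P ++ [p.1])) := by
          apply List.filter_congr
          intro q hq
          have := hnomem q hq
          simp [List.mem_append, this]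
        simp only [pvStepB, PySem.Dict.pop?, PySem.Dict.get?, PySem.Dict.items, hfind, hf,
          Option.map_none, ← hfilt, pvMg, pvG]
      have hcc : (dict2.any fun r => r.1 == p.1) = false := by simpa using hc
      have hl : P ++ [p.1] ++ l1.map Prod.fst = P ++ p.1 :: l1.map Prod.fst := by simp
      rw [List.foldl_cons, hstep, ih (P ++ [p.1]) pm (u1 ++ [pvMg p]) hnd2 hP']
      simp [List.filter_cons, hc, hcc, List.append_assoc]
      rw [hl]
      rfl
    | some q =>
      have hq1 : q.1 = p.1 := by
        have := List.find?_some hf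
        simpa using this
      have hgets : (PySem.Dict.mk dict2).get? p.1 = some q.2 := by rw [hget2, hf]; rfl
      have hc : (PySem.Dict.mk dict2).contains p.1 = true := by
        rw [PySem.Dict.contains_eq_isSome_get?, hgets]; rfl
      have hgD : (PySem.Dict.mk dict2).getD p.1 [] = q.2 := by
        rw [PySem.Dict.getD_eq_get?_getD, hgets]; rfl
      have hstep : pvStepB (PySem.Dict.mk ((dict2.map pvMg).filter
            (fun q => !decide (q.1 ∈ P))), pm, u1) p
          = (PySem.Dict.mk ((dict2.map pvMg).filter (fun q => !decide (q.1 ∈ P ++ [p.1]))),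
             pm ++ [pvFP (PySem.Dict.mk dict2) p], u1) := by
        have hfilt : ((dict2.map pvMg).filter (fun q => !decide (q.1 ∈ P))).filter
              (fun x => !(x.1 == p.1))
            = (dict2.map pvMg).filter (fun q => !decide (q.1 ∈ P ++ [p.1])) := by
          rw [List.filter_filter]
          apply List.filter_congr
          intro x hx
          by_cases h1 : x.1 ∈ P <;> by_cases h2 : x.1 = p.1 <;>
            simp [List.mem_append, h1, h2]
        simp only [pvStepB, PySem.Dict.pop?, PySem.Dict.get?, PySem.Dict.erase,
          PySem.Dict.items, hfind, hf, Option.map_some]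
        simp only [pvMg, pvG, pvFP, hgD, hfilt]
        simp [List.getD]
      have hcc : (dict2.any fun r => r.1 == p.1) = true := by simpa using hc
      have hl : P ++ [p.1] ++ l1.map Prod.fst = P ++ p.1 :: l1.map Prod.fst := by simp
      rw [List.foldl_cons, hstep, ih (P ++ [p.1]) (pm ++ [pvFP (PySem.Dict.mk dict2) p]) u1 hnd2 hP']
      simp [List.filter_cons, hc, hcc, List.append_assoc]
      rw [hl]
      rfl

-- ===== VERDICT (by name: the statement is the Claim_ definition above) =====
theorem pMSA_dict_spec : Claim_equal_pMSA_dict := by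
  intro dict1 dict2 _ hpre
  obtain ⟨h1, _h2, _, _⟩ := hpre
  unfold Spec_pMSA_dict
  simp only [pMSA_dict, pMSA_dict_alt]
  have hmg : (fun p : String × List String => (p.1, [p.2.getD 0 "", p.2.getD 1 ""])) = pvMg := rfl
  rw [hmg]
  have hinit : PySem.Dict.mk (dict2.map pvMg)
      = PySem.Dict.mk ((dict2.map pvMg).filter (fun q => !decide (q.1 ∈ ([] : List String)))) := by
    simp
  rw [hinit, pv_bfold dict2 dict1 [] [] [] h1 (by simp),
    pv_afold (PySem.Dict.mk dict2) dict1 [] [], pv_ufold (PySem.Dict.mk dict1) dict2 []]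
  simp only [List.nil_append, PySem.Dict.items]
  simp only [Prod.mk.injEq]
  refine ⟨trivial, trivial, ?_⟩
  rw [List.filter_map]
  simp only [Function.comp_def]
  congr 1
  apply List.filter_congr
  intro x hx
  rw [pv_contains_mk]
  simp [pvMg]
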